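-- pv_equiv track=rewrite | github.com/DadeJahnavi/physioguide-ai | src/parse_pt_dataset_windows.py | find_col_indices
-- ===== SOURCE A (Python) =====
-- def find_col_indices(cols):
--     lower = [c.lower().strip() for c in cols]
--     def idx_of(prefixes):
--         for p in prefixes:
--             for i,c in enumerate(lower):
--                 if c.startswith(p):
--                     return i
--         return None
--     ax_i = idx_of(["acc_x","accx","acc x","accel_x"])
--     ay_i = idx_of(["acc_y","accy","acc y","accel_y"])
--     az_i = idx_of(["acc_z","accz","acc z","accel_z"])
--     gx_i = idx_of(["gyr_x","gyrx","gyr x","gyro_x"])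
--     gy_i = idx_of(["gyr_y","gyry","gyr y","gyro_y"])
--     gz_i = idx_of(["gyr_z","gyrz","gyr z","gyro_z"])
--     return ax_i,ay_i,az_i,gx_i,gy_i,gz_i
-- ===== SOURCE B (Python) =====
-- _GROUPS = [
--     ["acc_x", "accx", "acc x", "accel_x"],
--     ["acc_y", "accy", "acc y", "accel_y"],
--     ["acc_z", "accz", "acc z", "accel_z"],
--     ["gyr_x", "gyrx", "gyr x", "gyro_x"],
--     ["gyr_y", "gyry", "gyr y", "gyro_y"],
--     ["gyr_z", "gyrz", "gyr z", "gyro_z"],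
-- ]
-- _ALL_PREFIXES = [p for g in _GROUPS for p in g]
--
--
-- def find_col_indices(cols):
--     lower = [c.lower().strip() for c in cols]
--     # One pass over the columns: remember the FIRST column index per prefix.
--     first = {}
--     for i, c in enumerate(lower):
--         for p in _ALL_PREFIXES:
--             if p not in first and c.startswith(p):
--                 first[p] = i
--     # Resolve each group in prefix-priority order.
--     return tuple(next((first[p] for p in g if p in first), None) for g in _GROUPS)
-- ===== Notes on version B (the rewrite author's own statement) =====
-- stated objective: alternative
-- what changed: Replaces 24 repeated full scans of the column list (one per prefix) by a single pass that records the first column index per prefix in a dict, after which each group is resolved by dict lookups in prefix-priority order.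
import Mathlib
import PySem

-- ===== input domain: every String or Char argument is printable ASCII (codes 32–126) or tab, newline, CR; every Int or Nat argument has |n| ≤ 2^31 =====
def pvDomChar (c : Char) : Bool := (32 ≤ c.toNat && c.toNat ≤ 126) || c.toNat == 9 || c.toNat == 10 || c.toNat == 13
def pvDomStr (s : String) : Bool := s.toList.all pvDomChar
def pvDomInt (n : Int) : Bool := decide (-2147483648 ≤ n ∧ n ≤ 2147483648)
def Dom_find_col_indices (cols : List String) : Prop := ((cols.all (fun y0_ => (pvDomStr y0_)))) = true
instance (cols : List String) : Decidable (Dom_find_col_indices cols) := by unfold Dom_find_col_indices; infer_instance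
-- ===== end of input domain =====

-- B replaces A's repeated per-prefix scans of the column list by one pass building a
-- dict of first index per prefix, then resolves each group by lookups (alternative).


-- ===== PORT A =====
-- inner 'for i,c in enumerate(lower): if c.startswith(p): return i'
def pvScanA (p : String) : List (Int × String) → Option Int
  | [] => none
  | (i, c) :: rest => if PySem.Str.startswith c p then some i else pvScanA p rest

-- 'def idx_of(prefixes): for p in prefixes: … return None'
def pvIdxOf (lower : List String) : List String → Option Int
  | [] => none
  | p :: ps =>
    match pvScanA p (PySem.List.enumerate lower) with
    | some i => some i
    | none => pvIdxOf lower ps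

def find_col_indices (cols : List String) :
    Option Int × Option Int × Option Int × Option Int × Option Int × Option Int :=
  let lower := cols.map (fun c => PySem.Str.strip (PySem.Str.lower c))
  (pvIdxOf lower ["acc_x", "accx", "acc x", "accel_x"],
   pvIdxOf lower ["acc_y", "accy", "acc y", "accel_y"],
   pvIdxOf lower ["acc_z", "accz", "acc z", "accel_z"],
   pvIdxOf lower ["gyr_x", "gyrx", "gyr x", "gyro_x"],
   pvIdxOf lower ["gyr_y", "gyry", "gyr y", "gyro_y"],
   pvIdxOf lower ["gyr_z", "gyrz", "gyr z", "gyro_z"])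

-- ===== PORT B =====
def pvAllPrefixes : List String :=
  ["acc_x", "accx", "acc x", "accel_x",
   "acc_y", "accy", "acc y", "accel_y",
   "acc_z", "accz", "acc z", "accel_z",
   "gyr_x", "gyrx", "gyr x", "gyro_x",
   "gyr_y", "gyry", "gyr y", "gyro_y",
   "gyr_z", "gyrz", "gyr z", "gyro_z"]

-- 'if p not in first and c.startswith(p): first[p] = i', for one column (i, c)
def pvStepB (d : PySem.Dict String Int) (ic : Int × String) : PySem.Dict String Int :=
  pvAllPrefixes.foldl
    (fun d p =>
      if !(d.contains p) && PySem.Str.startswith ic.2 p then d.insert p ic.1 else d) d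

-- 'next((first[p] for p in g if p in first), None)'
def pvPickB (first : PySem.Dict String Int) (g : List String) : Option Int :=
  g.findSome? (fun p => first.get? p)

def find_col_indices_alt (cols : List String) :
    Option Int × Option Int × Option Int × Option Int × Option Int × Option Int :=
  let lower := cols.map (fun c => PySem.Str.strip (PySem.Str.lower c))
  let first := (PySem.List.enumerate lower).foldl pvStepB PySem.Dict.empty
  (pvPickB first ["acc_x", "accx", "acc x", "accel_x"],
   pvPickB first ["acc_y", "accy", "acc y", "accel_y"],
   pvPickB first ["acc_z", "accz", "acc z", "accel_z"],
   pvPickB first ["gyr_x", "gyrx", "gyr x", "gyro_x"],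
   pvPickB first ["gyr_y", "gyry", "gyr y", "gyro_y"],
   pvPickB first ["gyr_z", "gyrz", "gyr z", "gyro_z"])

-- ===== PRECONDITION & SPEC =====
def Spec_find_col_indices (cols : List String) (out : Option Int × Option Int × Option Int × Option Int × Option Int × Option Int) : Prop := out = find_col_indices_alt cols
instance (cols : List String) (out : Option Int × Option Int × Option Int × Option Int × Option Int × Option Int) : Decidable (Spec_find_col_indices cols out) := by unfold Spec_find_col_indices; infer_instance

-- ===== CLAIM (what is proved, stated in full; the proofs are below) =====
def Claim_equal_find_col_indices : Prop := ∀ (cols : List String), Dom_find_col_indices cols → Spec_find_col_indices cols (find_col_indices cols)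

-- ===== LEMMAS AND PROOFS =====

-- one column's inner prefix loop: sets q ↦ i exactly when q is a matching, still-absent prefix
theorem pv_innerFold (c : String) (i : Int) (q : String) :
    ∀ (P : List String) (d : PySem.Dict String Int),
    ((P.foldl
        (fun d p =>
          if !(d.contains p) && PySem.Str.startswith c p then d.insert p i else d) d).get? q)
      = if q ∈ P ∧ PySem.Str.startswith c q = true ∧ d.contains q = false then some i
        else d.get? q := by
  intro P
  induction P with
  | nil => intro d; simp
  | cons p P ih =>
    intro d
    simp only [List.foldl_cons]
    by_cases hpq : q = p
    · subst hpq
      by_cases hc : d.contains q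
      · simp only [hc, Bool.not_true, Bool.false_and, ih]
        simp [hc]
      · by_cases hsw : PySem.Str.startswith c q
        · simp only [hc, hsw, Bool.not_false, Bool.and_self, if_true, ih]
          simp [PySem.Dict.contains_insert_self, PySem.Dict.get?_insert_self]
        · simp only [hsw, Bool.and_false, ih]
          simp
    · by_cases hb : (!(d.contains p) && PySem.Str.startswith c p) = true
      · simp only [hb, if_true, ih]
        simp [PySem.Dict.get?_insert, PySem.Dict.contains_insert, hpq]
      · simp only [hb, ih]
        simp [List.mem_cons, hpq]
  
-- the one-pass dict lookup equals A's first-match scan (below any existing entry)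
theorem pv_outerFold (q : String) (hq : q ∈ pvAllPrefixes) :
    ∀ (E : List (Int × String)) (d : PySem.Dict String Int),
    ((E.foldl pvStepB d).get? q) = (d.get? q).or (pvScanA q E) := by
  intro E
  induction E with
  | nil => intro d; simp [pvScanA]
  | cons ic E ih =>
    obtain ⟨i, c⟩ := ic
    intro d
    simp only [List.foldl_cons, ih]
    have hstep : (pvStepB d (i, c)).get? q
        = if q ∈ pvAllPrefixes ∧ PySem.Str.startswith c q = true ∧ d.contains q = false
          then some i else d.get? q := pv_innerFold c i q pvAllPrefixes d
    rw [hstep]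
    by_cases hsw : PySem.Chars.startswith c.toList q.toList = true
    · by_cases hc : d.contains q
      · have hg : ∃ v, d.get? q = some v := by
          have h2 := PySem.Dict.contains_eq_isSome_get? d q
          rw [hc] at h2
          exact Option.isSome_iff_exists.mp h2.symm
        obtain ⟨v, hv⟩ := hg
        simp [hq, hsw, hc, hv, pvScanA]
      · have hg : d.get? q = none := by
          have h2 := PySem.Dict.contains_eq_isSome_get? d q
          cases h : d.get? q with
          | none => rfl
          | some v => rw [h] at h2; simp at h2; exact absurd h2 hc
        simp [hq, hsw, hc, hg, pvScanA]
    · simp [hsw, pvScanA]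

-- group resolution: A's prefix-priority scan = B's findSome? over the dict
theorem pv_pick (lower : List String) :
    ∀ (g : List String), (∀ p ∈ g, p ∈ pvAllPrefixes) →
    pvIdxOf lower g
      = pvPickB ((PySem.List.enumerate lower).foldl pvStepB PySem.Dict.empty) g := by
  intro g
  induction g with
  | nil => intro _; simp [pvIdxOf, pvPickB]
  | cons p ps ih =>
    intro h
    have hp : p ∈ pvAllPrefixes := h p (List.mem_cons_self ..)
    have hd : ((PySem.List.enumerate lower).foldl pvStepB PySem.Dict.empty).get? p
        = pvScanA p (PySem.List.enumerate lower) := by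
      rw [pv_outerFold p hp]
      simp [PySem.Dict.get?_empty]
    simp only [pvIdxOf, pvPickB, List.findSome?_cons, hd]
    cases hscan : pvScanA p (PySem.List.enumerate lower) with
    | none =>
      simpa [pvPickB] using ih (fun r hr => h r (List.mem_cons_of_mem _ hr))
    | some i => rfl

-- ===== VERDICT (by name: the statement is the Claim_ definition above) =====
theorem find_col_indices_spec : Claim_equal_find_col_indices := by
  intro cols _
  unfold Spec_find_col_indices find_col_indices find_col_indices_alt
  refine Prod.ext ?_ (Prod.ext ?_ (Prod.ext ?_ (Prod.ext ?_ (Prod.ext ?_ ?_)))) <;>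
    · apply pv_pick
      intro p hp
      fin_cases hp <;> simp [pvAllPrefixes]
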